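-- pv_equiv track=rewrite | github.com/DOKOS-TAYOS/Tensor-Network-Visualization | src/tensor_network_viz/_core/_label_format.py | _iter_dollar_runs
-- ===== SOURCE A (Python) =====
-- from typing import Literal
--
-- def _iter_dollar_runs(
--     s: str,
-- ) -> list[tuple[Literal["plain", "math"], str]] | None:
--     buf: list[str] = []
--     math = False
--     i = 0
--     n = len(s)
--     runs: list[tuple[Literal["plain", "math"], str]] = []
--     while i < n:
--         if s[i] == "$":
--             if i + 1 < n and s[i + 1] == "$":
--                 buf.append("$")
--                 i += 2
--                 continue
--             kind: Literal["plain", "math"] = "math" if math else "plain"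
--             runs.append((kind, "".join(buf)))
--             buf = []
--             math = not math
--             i += 1
--             continue
--         buf.append(s[i])
--         i += 1
--     runs.append(("math" if math else "plain", "".join(buf)))
--     if math:
--         return None
--     return runs
-- ===== SOURCE B (Python) =====
-- def _iter_dollar_runs(s):
--     # Stage 1: pair escaped dollars by splitting on "$$"; Stage 2: split each
--     # piece on single "$" delimiters; glue pieces back with a literal "$".
--     segs_lists = [piece.split("$") for piece in s.split("$$")]
--     segs = segs_lists[0]
--     for sl in segs_lists[1:]:
--         segs = segs[:-1] + [segs[-1] + "$" + sl[0]] + sl[1:]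
--     if len(segs) % 2 == 0:
--         return None
--     return [("math" if j % 2 else "plain", seg) for j, seg in enumerate(segs)]
-- ===== Notes on version B (the rewrite author's own statement) =====
-- stated objective: faster
-- what changed: Replaces A's per-character index scanner (inline two-dollar lookahead, a buffer and a toggled math flag) by a two-stage bulk decomposition: split the string on the two-dollar escape sequence, split each piece on the single-dollar delimiter, glue the pieces back with a literal dollar, and label the resulting segments by index parity.
import Mathlib
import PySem

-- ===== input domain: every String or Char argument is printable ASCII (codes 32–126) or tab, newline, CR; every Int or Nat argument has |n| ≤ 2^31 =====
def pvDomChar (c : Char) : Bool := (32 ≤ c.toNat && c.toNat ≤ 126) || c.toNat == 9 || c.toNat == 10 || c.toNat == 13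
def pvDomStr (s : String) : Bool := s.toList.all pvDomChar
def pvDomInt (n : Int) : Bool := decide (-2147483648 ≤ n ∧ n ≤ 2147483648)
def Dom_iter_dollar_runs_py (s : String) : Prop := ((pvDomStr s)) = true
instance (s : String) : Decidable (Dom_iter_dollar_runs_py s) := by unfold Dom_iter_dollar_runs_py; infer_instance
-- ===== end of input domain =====

-- B replaces A's per-character index scanner by a two-stage bulk decomposition: split on the two-dollar escape sequence, split each piece on the single-dollar delimiter, glue pieces back with a literal dollar, and label segments by index parity.


-- ===== PORT A =====
-- "math" if math else "plain"
def pvKind (math : Bool) : String := if math then "math" else "plain"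

-- A's while-loop over i (i advances by 1 or 2) as recursion over the remaining characters;
-- buf is kept as the flat list of characters ("".join(buf) = String.ofList buf).
def pvScanA : List Char → List Char → Bool → List (String × String) → Option (List (String × String))
  | '$' :: '$' :: rest, buf, math, runs => pvScanA rest (buf ++ ['$']) math runs
  | '$' :: rest, buf, math, runs =>
      pvScanA rest [] (!math) (runs ++ [(pvKind math, String.ofList buf)])
  | c :: rest, buf, math, runs => pvScanA rest (buf ++ [c]) math runs
  | [], buf, math, runs =>
      if math then none else some (runs ++ [(pvKind math, String.ofList buf)])

def iter_dollar_runs_py (s : String) : Option (List (String × String)) :=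
  pvScanA s.toList [] false []

-- ===== PORT B =====
-- segs = segs[:-1] + [segs[-1] + "$" + sl[0]] + sl[1:]   (segs and sl are never empty in B)
def pvGlueStep (segs sl : List (List Char)) : List (List Char) :=
  segs.dropLast ++ [(segs.getLastD []) ++ '$' :: (sl.headD [])] ++ sl.tail

def iter_dollar_runs_py_alt (s : String) : Option (List (String × String)) :=
  let sls := (PySem.Chars.splitOn s.toList ['$', '$']).map (fun piece => PySem.Chars.splitOn piece ['$'])
  let segs := sls.tail.foldl pvGlueStep (sls.headD [])
  if segs.length % 2 == 0 then none
  else some ((PySem.List.enumerate segs).map (fun js =>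
    ((if js.1 % 2 ≠ 0 then "math" else "plain"), String.ofList js.2)))

-- ===== PRECONDITION & SPEC =====
def Spec_iter_dollar_runs_py (s : String) (out : Option (List (String × String))) : Prop := out = iter_dollar_runs_py_alt s
instance (s : String) (out : Option (List (String × String))) : Decidable (Spec_iter_dollar_runs_py s out) := by unfold Spec_iter_dollar_runs_py; infer_instance

-- ===== CLAIM (what is proved, stated in full; the proofs are below) =====
def Claim_equal_iter_dollar_runs_py : Prop := ∀ (s : String), Dom_iter_dollar_runs_py s → Spec_iter_dollar_runs_py s (iter_dollar_runs_py s)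

-- ===== LEMMAS AND PROOFS =====

def pvConsHead (c : Char) : List (List Char) → List (List Char)
  | h :: t => (c :: h) :: t
  | [] => [[c]]

-- recursive characterisation of piece.split("$")
def pvSplit1 : List Char → List (List Char)
  | [] => [[]]
  | c :: rest => if c = '$' then [] :: pvSplit1 rest else pvConsHead c (pvSplit1 rest)

-- recursive characterisation of s.split("$$") (greedy left-to-right pairing)
def pvSplit2 : List Char → List (List Char)
  | [] => [[]]
  | [c] => pvConsHead c [[]]
  | c :: d :: rest =>
      if c = '$' ∧ d = '$' then [] :: pvSplit2 rest else pvConsHead c (pvSplit2 (d :: rest))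

-- the common intermediate object: the segments between unescaped '$' delimiters
def pvSegs : List Char → List (List Char)
  | [] => [[]]
  | [c] => if c = '$' then [[], []] else [[c]]
  | c :: d :: rest =>
      if c = '$' then
        (if d = '$' then pvConsHead '$' (pvSegs rest) else [] :: pvSegs (d :: rest))
      else pvConsHead c (pvSegs (d :: rest))

def pvPre (pre : List Char) : List (List Char) → List (List Char)
  | h :: t => (pre ++ h) :: t
  | [] => [pre]

-- alternating labels starting at `math`
def pvLabel : Bool → List (List Char) → List (String × String)
  | _, [] => []
  | math, seg :: rest => (pvKind math, String.ofList seg) :: pvLabel (!math) rest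

theorem pvConsHead_ne_nil (c : Char) (S : List (List Char)) : pvConsHead c S ≠ [] := by
  cases S <;> simp [pvConsHead]

theorem pvConsHead_length (c : Char) (S : List (List Char)) (hS : S ≠ []) :
    (pvConsHead c S).length = S.length := by
  cases S with
  | nil => exact absurd rfl hS
  | cons h t => simp [pvConsHead]

theorem pvSplit1_ne_nil (cs : List Char) : pvSplit1 cs ≠ [] := by
  cases cs with
  | nil => simp [pvSplit1]
  | cons c rest =>
    simp only [pvSplit1]
    split
    · simp
    · exact pvConsHead_ne_nil _ _

theorem pvSplit2_ne_nil (cs : List Char) : pvSplit2 cs ≠ [] := by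
  induction cs using pvSplit2.induct with
  | case1 => simp [pvSplit2]
  | case2 c => simp only [pvSplit2]; exact pvConsHead_ne_nil _ _
  | case3 c d rest h ih => simp [pvSplit2, h]
  | case4 c d rest h ih => simp only [pvSplit2, if_neg h]; exact pvConsHead_ne_nil _ _

theorem pvSegs_ne_nil (cs : List Char) : pvSegs cs ≠ [] := by
  induction cs using pvSegs.induct with
  | case1 => simp [pvSegs]
  | case2 => simp [pvSegs]
  | case3 c hc => simp [pvSegs, hc]
  | case4 rest ih => simp only [pvSegs, if_true]; exact pvConsHead_ne_nil _ _
  | case5 d rest hd ih => simp [pvSegs, hd]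
  | case6 c d rest hc ih => simp only [pvSegs, if_neg hc]; exact pvConsHead_ne_nil _ _

theorem pvPre_consHead (buf : List Char) (c : Char) (S : List (List Char)) (hS : S ≠ []) :
    pvPre buf (pvConsHead c S) = pvPre (buf ++ [c]) S := by
  cases S with
  | nil => exact absurd rfl hS
  | cons h t => simp [pvConsHead, pvPre]

theorem pvPre_nil (S : List (List Char)) (hS : S ≠ []) : pvPre [] S = S := by
  cases S with
  | nil => exact absurd rfl hS
  | cons h t => simp [pvPre]

-- ---- split("$") is pvSplit1 ----
theorem pvSplitOn1_go_eq (fuel : Nat) :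
    ∀ (l cur : List Char) (acc : List (List Char)), l.length ≤ fuel →
      PySem.Chars.splitOn.go ['$'] fuel l cur acc = acc.reverse ++ pvPre cur.reverse (pvSplit1 l) := by
  induction fuel with
  | zero =>
    intro l cur acc h
    have : l = [] := by cases l <;> simp_all
    subst this
    simp [PySem.Chars.splitOn.go, pvSplit1, pvPre]
  | succ fuel ih =>
    intro l cur acc h
    cases l with
    | nil => simp [PySem.Chars.splitOn.go, pvSplit1, pvPre]
    | cons c rest =>
      by_cases hc : c = '$'
      · subst hc
        have hpre : List.isPrefixOf ['$'] ('$' :: rest) = true := by simp [List.isPrefixOf]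
        rw [PySem.Chars.splitOn.go, if_pos hpre]
        have hdrop : List.drop (['$'] : List Char).length ('$' :: rest) = rest := by simp
        rw [hdrop]
        simp only [List.length_cons] at h
        rw [ih _ _ _ (by omega)]
        simp only [pvSplit1, if_true, List.reverse_nil]
        rw [pvPre_nil _ (pvSplit1_ne_nil rest)]
        simp [pvPre, List.append_assoc]
      · have hpre : List.isPrefixOf ['$'] (c :: rest) = false := by
          simp [List.isPrefixOf]; exact fun h => absurd h.symm hc
        rw [PySem.Chars.splitOn.go, if_neg (by simp [hpre])]
        simp only [List.length_cons] at h
        rw [ih _ _ _ (Nat.le_of_succ_le_succ h)]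
        simp only [pvSplit1, if_neg hc]
        rw [pvPre_consHead _ _ _ (pvSplit1_ne_nil rest)]
        simp [pvPre]

theorem pvSplitOn1_eq (cs : List Char) : PySem.Chars.splitOn cs ['$'] = pvSplit1 cs := by
  rw [PySem.Chars.splitOn, pvSplitOn1_go_eq (cs.length + 1) cs [] [] (Nat.le_succ _)]
  simp only [List.reverse_nil]
  rw [pvPre_nil _ (pvSplit1_ne_nil cs)]
  simp

-- ---- split("$$") is pvSplit2 ----
theorem pvSplitOn2_go_eq (fuel : Nat) :
    ∀ (l cur : List Char) (acc : List (List Char)), l.length ≤ fuel →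
      PySem.Chars.splitOn.go ['$', '$'] fuel l cur acc = acc.reverse ++ pvPre cur.reverse (pvSplit2 l) := by
  induction fuel with
  | zero =>
    intro l cur acc h
    have : l = [] := by cases l <;> simp_all
    subst this
    simp [PySem.Chars.splitOn.go, pvSplit2, pvPre]
  | succ fuel ih =>
    intro l cur acc h
    match l, h with
    | [], _ => simp [PySem.Chars.splitOn.go, pvSplit2, pvPre]
    | [c], h =>
      have hpre : List.isPrefixOf ['$', '$'] [c] = false := by
        simp [List.isPrefixOf]
      rw [PySem.Chars.splitOn.go, if_neg (by simp [hpre])]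
      rw [ih [] (c :: cur) acc (by simp)]
      simp [pvSplit2, pvPre, pvConsHead]
    | c :: d :: rest, h =>
      by_cases hcd : c = '$' ∧ d = '$'
      · obtain ⟨hc, hd⟩ := hcd
        subst hc; subst hd
        have hpre : List.isPrefixOf ['$', '$'] ('$' :: '$' :: rest) = true := by
          simp [List.isPrefixOf]
        rw [PySem.Chars.splitOn.go, if_pos hpre]
        have hdrop : List.drop (['$', '$'] : List Char).length ('$' :: '$' :: rest) = rest := by
          simp
        rw [hdrop]
        simp only [List.length_cons] at h
        rw [ih rest [] (cur.reverse :: acc) (by omega)]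
        have h2 : pvSplit2 ('$' :: '$' :: rest) = [] :: pvSplit2 rest := by
          simp [pvSplit2]
        rw [h2]
        simp only [List.reverse_nil]
        rw [pvPre_nil _ (pvSplit2_ne_nil rest)]
        simp [pvPre, List.append_assoc]
      · have hpre : List.isPrefixOf ['$', '$'] (c :: d :: rest) = false := by
          simp [List.isPrefixOf]
          intro hc hd
          exact absurd ⟨hc.symm, hd.symm⟩ hcd
        rw [PySem.Chars.splitOn.go, if_neg (by simp [hpre])]
        simp only [List.length_cons] at h
        rw [ih (d :: rest) (c :: cur) acc (by simp; omega)]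
        simp only [pvSplit2, if_neg hcd]
        rw [pvPre_consHead _ _ _ (pvSplit2_ne_nil (d :: rest))]
        simp [pvPre]

theorem pvSplitOn2_eq (cs : List Char) : PySem.Chars.splitOn cs ['$', '$'] = pvSplit2 cs := by
  rw [PySem.Chars.splitOn, pvSplitOn2_go_eq (cs.length + 1) cs [] [] (Nat.le_succ _)]
  simp only [List.reverse_nil]
  rw [pvPre_nil _ (pvSplit2_ne_nil cs)]
  simp

-- ---- the glue fold commutes with prefixing the first piece ----
theorem pvGlueStep_ne_nil (a sl : List (List Char)) : pvGlueStep a sl ≠ [] := by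
  simp [pvGlueStep]

theorem pvGlue_consHead (c : Char) (a sl : List (List Char)) (ha : a ≠ []) :
    pvGlueStep (pvConsHead c a) sl = pvConsHead c (pvGlueStep a sl) := by
  cases a with
  | nil => exact absurd rfl ha
  | cons h t =>
    cases t with
    | nil => simp [pvGlueStep, pvConsHead]
    | cons h2 t2 => simp [pvGlueStep, pvConsHead]

theorem pvGlue_consNil (a sl : List (List Char)) (ha : a ≠ []) :
    pvGlueStep ([] :: a) sl = [] :: pvGlueStep a sl := by
  cases a with
  | nil => exact absurd rfl ha
  | cons h t =>
    cases t with
    | nil => simp [pvGlueStep]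
    | cons h2 t2 => simp [pvGlueStep]

theorem pvFoldGlue_consHead (L : List (List (List Char))) (c : Char) :
    ∀ (a : List (List Char)), a ≠ [] →
      L.foldl pvGlueStep (pvConsHead c a) = pvConsHead c (L.foldl pvGlueStep a) := by
  induction L with
  | nil => intro a ha; simp
  | cons sl rest ih =>
    intro a ha
    simp only [List.foldl_cons]
    rw [pvGlue_consHead c a sl ha, ih _ (pvGlueStep_ne_nil a sl)]

theorem pvFoldGlue_consNil (L : List (List (List Char))) :
    ∀ (a : List (List Char)), a ≠ [] →
      L.foldl pvGlueStep ([] :: a) = [] :: L.foldl pvGlueStep a := by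
  induction L with
  | nil => intro a ha; simp
  | cons sl rest ih =>
    intro a ha
    simp only [List.foldl_cons]
    rw [pvGlue_consNil a sl ha, ih _ (pvGlueStep_ne_nil a sl)]

-- ---- the B pipeline computes pvSegs ----
def pvFold (M : List (List (List Char))) : List (List Char) :=
  M.tail.foldl pvGlueStep (M.headD [])

theorem pvSplit1_cons_dollar (p : List Char) : pvSplit1 ('$' :: p) = [] :: pvSplit1 p := by
  simp [pvSplit1]

theorem pvSplit1_cons (c : Char) (p : List Char) (hc : c ≠ '$') :
    pvSplit1 (c :: p) = pvConsHead c (pvSplit1 p) := by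
  simp [pvSplit1, hc]

theorem pvFold_cons_cons (a b : List (List Char)) (L : List (List (List Char))) :
    pvFold (a :: b :: L) = L.foldl pvGlueStep (pvGlueStep a b) := by
  simp [pvFold]

theorem pvKey (cs : List Char) : pvFold ((pvSplit2 cs).map pvSplit1) = pvSegs cs := by
  induction cs using pvSplit2.induct with
  | case1 => simp [pvSplit2, pvSegs, pvFold, pvSplit1]
  | case2 c =>
    by_cases hc : c = '$'
    · subst hc
      simp [pvSplit2, pvConsHead, pvFold, pvSplit1, pvSegs]
    · simp [pvSplit2, pvConsHead, pvFold, pvSplit1, hc, pvSegs]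
  | case3 c d rest hcd ih =>
    obtain ⟨hc, hd⟩ := hcd
    subst hc; subst hd
    simp only [pvSplit2, and_self, if_true]
    obtain ⟨p, t, hs⟩ : ∃ p t, pvSplit2 rest = p :: t := by
      cases h : pvSplit2 rest with
      | nil => exact absurd h (pvSplit2_ne_nil rest)
      | cons p t => exact ⟨p, t, rfl⟩
    rw [hs]
    have hp : pvSplit1 ([] : List Char) = [[]] := by simp [pvSplit1]
    simp only [List.map_cons, hp, pvFold_cons_cons]
    have hglue : pvGlueStep [[]] (pvSplit1 p) = pvConsHead '$' (pvSplit1 p) := by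
      cases h : pvSplit1 p with
      | nil => exact absurd h (pvSplit1_ne_nil p)
      | cons q u => simp [pvGlueStep, pvConsHead]
    rw [hglue, pvFoldGlue_consHead _ _ _ (pvSplit1_ne_nil p)]
    have hv : (List.map pvSplit1 t).foldl pvGlueStep (pvSplit1 p) = pvSegs rest := by
      have h2 := ih
      rw [hs] at h2
      simpa [pvFold] using h2
    rw [hv]
    cases rest with
    | nil => simp [pvSegs, pvConsHead]
    | cons e r =>
      cases r with
      | nil => simp [pvSegs]
      | cons f r2 => simp [pvSegs]
  | case4 c d rest hcd ih =>
    simp only [pvSplit2, if_neg hcd]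
    obtain ⟨p, t, hs⟩ : ∃ p t, pvSplit2 (d :: rest) = p :: t := by
      cases h : pvSplit2 (d :: rest) with
      | nil => exact absurd h (pvSplit2_ne_nil (d :: rest))
      | cons p t => exact ⟨p, t, rfl⟩
    have hv : (List.map pvSplit1 t).foldl pvGlueStep (pvSplit1 p) = pvSegs (d :: rest) := by
      have h2 := ih
      rw [hs] at h2
      simpa [pvFold] using h2
    rw [hs]
    by_cases hc : c = '$'
    · subst hc
      have hd : d ≠ '$' := fun h => hcd ⟨rfl, h⟩
      simp only [pvConsHead, List.map_cons]
      rw [pvSplit1_cons_dollar]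
      rw [show pvFold (([] :: pvSplit1 p) :: List.map pvSplit1 t)
            = (List.map pvSplit1 t).foldl pvGlueStep ([] :: pvSplit1 p) from rfl]
      rw [pvFoldGlue_consNil _ _ (pvSplit1_ne_nil p), hv]
      simp [pvSegs, hd]
    · simp only [pvConsHead, List.map_cons]
      rw [pvSplit1_cons c p hc]
      rw [show pvFold (pvConsHead c (pvSplit1 p) :: List.map pvSplit1 t)
            = (List.map pvSplit1 t).foldl pvGlueStep (pvConsHead c (pvSplit1 p)) from rfl]
      rw [pvFoldGlue_consHead _ _ _ (pvSplit1_ne_nil p), hv]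
      simp [pvSegs, hc]

-- ---- A's scanner in terms of pvSegs ----
theorem pvScanA_eq (cs buf : List Char) (math : Bool) (runs : List (String × String)) :
    pvScanA cs buf math runs =
      if (if (pvSegs cs).length % 2 = 0 then !math else math) then none
      else some (runs ++ pvLabel math (pvPre buf (pvSegs cs))) := by
  induction cs, buf, math, runs using pvScanA.induct with
  | case1 rest buf math runs ih =>
    rw [pvScanA.eq_1, ih]
    have h1 : pvSegs ('$' :: '$' :: rest) = pvConsHead '$' (pvSegs rest) := by
      simp [pvSegs]
    rw [h1, pvConsHead_length _ _ (pvSegs_ne_nil rest),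
        pvPre_consHead _ _ _ (pvSegs_ne_nil rest)]
  | case2 rest buf math runs hx ih =>
    rw [pvScanA.eq_2 _ _ _ _ hx, ih]
    have h1 : pvSegs ('$' :: rest) = [] :: pvSegs rest := by
      cases rest with
      | nil => simp [pvSegs]
      | cons d r =>
        have hd : d ≠ '$' := fun h => hx r (by rw [h])
        simp [pvSegs, hd]
    rw [h1]
    rw [pvPre_nil _ (pvSegs_ne_nil rest)]
    by_cases hp : (pvSegs rest).length % 2 = 0
    · have hq : ¬ (((pvSegs rest).length + 1) % 2 = 0) := by omega
      simp [hp, hq, pvPre, pvLabel, List.append_assoc]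
    · have hq : ((pvSegs rest).length + 1) % 2 = 0 := by omega
      simp [hp, hq, pvPre, pvLabel, List.append_assoc]
  | case3 c rest buf math runs hx hc ih =>
    rw [pvScanA.eq_3 _ _ _ _ _ hx hc, ih]
    have hcne : c ≠ '$' := fun h => hc h
    have h1 : pvSegs (c :: rest) = pvConsHead c (pvSegs rest) := by
      cases rest with
      | nil => simp [pvSegs, hcne, pvConsHead]
      | cons d r => simp [pvSegs, hcne]
    rw [h1, pvConsHead_length _ _ (pvSegs_ne_nil rest),
        pvPre_consHead _ _ _ (pvSegs_ne_nil rest)]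
  | case4 buf runs => simp [pvScanA, pvSegs]
  | case5 buf math runs hm =>
    have : math = false := by cases math <;> simp_all
    subst this
    simp [pvScanA, pvSegs, pvPre, pvLabel]

-- ---- index-parity labels are the alternating labels ----
theorem pvEnumLabel (segs : List (List Char)) :
    ∀ (j : Int), 0 ≤ j →
      (PySem.List.enumerate segs j).map (fun js =>
          ((if js.1 % 2 ≠ 0 then "math" else "plain"), String.ofList js.2))
        = pvLabel (decide (j % 2 = 1)) segs := by
  induction segs with
  | nil => intro j hj; simp [PySem.List.enumerate, pvLabel]
  | cons seg rest ih =>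
    intro j hj
    rw [PySem.List.enumerate_cons]
    simp only [List.map_cons, pvLabel]
    have h2 : j % 2 = 0 ∨ j % 2 = 1 := by omega
    have hk : (if j % 2 ≠ 0 then "math" else "plain") = pvKind (decide (j % 2 = 1)) := by
      rcases h2 with h | h <;> simp [h, pvKind]
    have hb : decide ((j + 1) % 2 = 1) = !decide (j % 2 = 1) := by
      have h3 : (j + 1) % 2 = 1 - j % 2 := by omega
      rcases h2 with h | h <;> simp [h3, h]
    rw [hk, ih (j + 1) (by omega), hb]

-- ===== VERDICT (by name: the statement is the Claim_ definition above) =====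
theorem iter_dollar_runs_py_spec : Claim_equal_iter_dollar_runs_py := by
  intro s _
  unfold Spec_iter_dollar_runs_py iter_dollar_runs_py iter_dollar_runs_py_alt
  simp only [pvSplitOn2_eq, pvSplitOn1_eq]
  have hk' : ((pvSplit2 s.toList).map (fun piece => pvSplit1 piece)).tail.foldl pvGlueStep
      (((pvSplit2 s.toList).map (fun piece => pvSplit1 piece)).headD []) = pvSegs s.toList := by
    have hk := pvKey s.toList
    unfold pvFold at hk
    exact hk
  rw [hk']
  rw [pvScanA_eq]
  rw [pvPre_nil _ (pvSegs_ne_nil s.toList)]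
  rw [pvEnumLabel (pvSegs s.toList) 0 le_rfl]
  by_cases hp : (pvSegs s.toList).length % 2 = 0 <;> simp [hp]
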